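-- pv_equiv track=rewrite | github.com/Leibniz23/MaratonaIC | MC521/19-04/probE.py | inversionsIn
-- ===== SOURCE A (Python) =====
-- def inversionsIn(lista, n):
--     i, count = 0, 0
--     while i < n - 1:
--         if lista[i] > lista[i+1]:
--             count += 1
--             i += 1
--         i += 1
--
--     return count
-- ===== SOURCE B (Python) =====
-- def inversionsIn(lista, n):
--     count, run = 0, 0
--     for i in range(n - 1):
--         if lista[i] > lista[i+1]:
--             run += 1
--         else:
--             count += (run + 1) // 2
--             run = 0
--     count += (run + 1) // 2
--     return count
-- ===== Notes on version B (the rewrite author's own statement) =====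
-- stated objective: alternative
-- what changed: Replaces the skip-by-two greedy while-loop with a single for-loop that accumulates descent run lengths and adds ceil(run/2) per maximal run.
-- outside the precondition, e.g. on inversionsIn([6, 2, -1, -5], 5): A returns 2, B raises IndexError
import Mathlib
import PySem

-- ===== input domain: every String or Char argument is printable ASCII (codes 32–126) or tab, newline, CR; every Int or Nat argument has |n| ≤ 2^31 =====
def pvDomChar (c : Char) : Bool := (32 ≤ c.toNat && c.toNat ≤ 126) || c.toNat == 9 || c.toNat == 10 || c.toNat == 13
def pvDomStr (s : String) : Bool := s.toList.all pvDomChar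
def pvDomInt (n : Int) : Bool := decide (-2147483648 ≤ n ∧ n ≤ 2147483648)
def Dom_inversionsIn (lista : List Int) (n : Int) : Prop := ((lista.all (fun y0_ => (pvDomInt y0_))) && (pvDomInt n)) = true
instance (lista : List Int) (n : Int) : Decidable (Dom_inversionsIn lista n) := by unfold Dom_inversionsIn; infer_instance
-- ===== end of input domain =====

-- B replaces A's skip-by-two greedy while-loop by a run-length scan adding ceil(run/2) per maximal descent run; same O(n) cost, different decomposition.

-- ===== PORT A =====
-- A's while-loop: i advances by 2 after a counted descent, else by 1.
-- Indexing uses pyGet? with a .getD 0 default; Pre_ keeps all accesses in range (Python raises there).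
def inversionsInGo (lista : List Int) (n i count : Int) : Int :=
  if i < n - 1 then
    if (PySem.List.pyGet? lista i).getD 0 > (PySem.List.pyGet? lista (i+1)).getD 0 then
      inversionsInGo lista n (i+2) (count+1)
    else
      inversionsInGo lista n (i+1) count
  else count
termination_by (n - 1 - i).toNat
decreasing_by all_goals omega

def inversionsIn (lista : List Int) (n : Int) : Int :=
  inversionsInGo lista n 0 0

-- ===== PORT B =====
-- B's for-loop over range(n-1) with state (count, run); flush (run+1)//2 at each run break and once at the end.
def inversionsIn_alt (lista : List Int) (n : Int) : Int :=
  let p := (PySem.List.pyRange 0 (n-1) 1).foldl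
    (fun (cr : Int × Int) i =>
      if (PySem.List.pyGet? lista i).getD 0 > (PySem.List.pyGet? lista (i+1)).getD 0 then
        (cr.1, cr.2 + 1)
      else
        (cr.1 + PySem.Int.floordiv (cr.2 + 1) 2, 0)) (0, 0)
  p.1 + PySem.Int.floordiv (p.2 + 1) 2

-- ===== PRECONDITION & SPEC =====
-- Pre_ excludes out-of-range inputs (n ≥ 2 with len(lista) < n): there A normally raises IndexError and
-- only returns at all when its skip-by-two jump happens to step over the single missing index, while B's
-- plain range(n-1) scan always raises IndexError there.
def Pre_inversionsIn (lista : List Int) (n : Int) : Prop :=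
  n ≤ (lista.length : Int) ∨ n ≤ 1
instance (lista : List Int) (n : Int) : Decidable (Pre_inversionsIn lista n) := by
  unfold Pre_inversionsIn; infer_instance

def pvWitness_inversionsIn : List Int × Int := ([3, 1, 2], 3)

def Spec_inversionsIn (lista : List Int) (n : Int) (out : Int) : Prop := out = inversionsIn_alt lista n
instance (lista : List Int) (n : Int) (out : Int) : Decidable (Spec_inversionsIn lista n out) := by unfold Spec_inversionsIn; infer_instance

-- ===== CLAIM (what is proved, stated in full; the proofs are below) =====
def Claim_equal_inversionsIn : Prop := ∀ (lista : List Int) (n : Int), Dom_inversionsIn lista n → Pre_inversionsIn lista n → Spec_inversionsIn lista n (inversionsIn lista n)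

-- ===== LEMMAS AND PROOFS =====

-- Common reference function: per-run accounting with pending run length r.
def pvF (lista : List Int) (n i r : Int) : Int :=
  if i < n - 1 then
    if (PySem.List.pyGet? lista i).getD 0 > (PySem.List.pyGet? lista (i+1)).getD 0 then
      pvF lista n (i+1) (r+1)
    else
      PySem.Int.floordiv (r+1) 2 + pvF lista n (i+1) 0
  else PySem.Int.floordiv (r+1) 2
termination_by (n - 1 - i).toNat
decreasing_by all_goals omega

lemma pvFd2 (r : Int) : PySem.Int.floordiv (r+3) 2 = 1 + PySem.Int.floordiv (r+1) 2 := by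
  rw [PySem.Int.floordiv_eq_ediv_of_pos (by norm_num), PySem.Int.floordiv_eq_ediv_of_pos (by norm_num)]
  omega

lemma pvF_add_two (lista : List Int) (n : Int) :
    ∀ (k : Nat) (i r : Int), (n - 1 - i).toNat = k → pvF lista n i (r+2) = 1 + pvF lista n i r := by
  intro k
  induction k using Nat.strong_induction_on with
  | _ k ih =>
    intro i r hk
    conv_lhs => rw [pvF]
    conv_rhs => rw [pvF]
    split_ifs with h1 h2
    · rw [show r + 2 + 1 = (r + 1) + 2 by ring]
      exact ih ((n - 1 - (i+1)).toNat) (by omega) (i+1) (r+1) rfl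
    · rw [show r + 2 + 1 = r + 3 by ring, pvFd2 r]; ring
    · rw [show r + 2 + 1 = r + 3 by ring, pvFd2 r]

lemma pvGo_eq (lista : List Int) (n : Int) :
    ∀ (k : Nat) (i c : Int), (n - 1 - i).toNat = k → inversionsInGo lista n i c = c + pvF lista n i 0 := by
  intro k
  induction k using Nat.strong_induction_on with
  | _ k ih =>
    intro i c hk
    conv_lhs => rw [inversionsInGo]
    conv_rhs => rw [pvF]
    split_ifs with h1 h2
    · -- descent at i: greedy skips to i+2
      rw [ih ((n - 1 - (i+2)).toNat) (by omega) (i+2) (c+1) rfl]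
      have key : pvF lista n (i+1) (0+1) = 1 + pvF lista n (i+2) 0 := by
        rw [pvF]
        split_ifs with h3 h4
        · rw [show i + 1 + 1 = i + 2 by ring, show (0:Int) + 1 + 1 = 0 + 2 by ring]
          exact pvF_add_two lista n ((n - 1 - (i+2)).toNat) (i+2) 0 rfl
        · rw [show i + 1 + 1 = i + 2 by ring]; norm_num
        · rw [pvF, if_neg (by omega)]
          norm_num
      rw [key]; ring
    · rw [ih ((n - 1 - (i+1)).toNat) (by omega) (i+1) c rfl]
      norm_num
    · norm_num

lemma pvFold_eq (lista : List Int) (n : Int) :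
    ∀ (k : Nat) (i c r : Int), (n - 1 - i).toNat = k →
      (let p := (PySem.List.pyRange i (n-1) 1).foldl
        (fun (cr : Int × Int) j =>
          if (PySem.List.pyGet? lista j).getD 0 > (PySem.List.pyGet? lista (j+1)).getD 0 then
            (cr.1, cr.2 + 1)
          else
            (cr.1 + PySem.Int.floordiv (cr.2 + 1) 2, 0)) (c, r)
       p.1 + PySem.Int.floordiv (p.2 + 1) 2) = c + pvF lista n i r := by
  intro k
  induction k using Nat.strong_induction_on with
  | _ k ih =>
    intro i c r hk
    by_cases h1 : i < n - 1
    · rw [PySem.List.pyRange_one_cons h1, List.foldl_cons, pvF, if_pos h1]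
      split_ifs with h2
      · exact ih ((n - 1 - (i+1)).toNat) (by omega) (i+1) c (r+1) rfl
      · rw [ih ((n - 1 - (i+1)).toNat) (by omega) (i+1) (c + PySem.Int.floordiv (r+1) 2) 0 rfl]
        ring
    · have hnil : PySem.List.pyRange i (n-1) 1 = [] := by
        simp [PySem.List.pyRange]; omega
      rw [hnil, pvF, if_neg h1]
      simp

-- ===== VERDICT (by name: the statement is the Claim_ definition above) =====
theorem inversionsIn_spec : Claim_equal_inversionsIn := by
  intro lista n _ _
  unfold Spec_inversionsIn inversionsIn inversionsIn_alt
  rw [pvGo_eq lista n ((n - 1 - 0).toNat) 0 0 rfl]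
  have := pvFold_eq lista n ((n - 1 - 0).toNat) 0 0 0 rfl
  simpa using this.symm
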